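-- pv_equiv track=rewrite | github.com/park-hg/baekjoon | samsung/17140.py | c_op
-- ===== SOURCE A (Python) =====
-- from collections import Counter
--
-- def r_op(array):
--     new_array = []
--     max_len = 0
--     for row in array:
--         row = [x for x in row if x != 0]
--         new_row = []
--         for num, cnt in sorted(Counter(row).most_common(), key=lambda x: (x[1], x[0])):
--             new_row.append(num)
--             if len(new_row) > 100:
--                 break
--             new_row.append(cnt)
--             if len(new_row) > 100:
--                 break
--         max_len = max(max_len, len(new_row))
--         new_array.append(new_row)
--
--     for row in new_array:
--         row += [0]*(max_len - len(row))
--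
--     return new_array
--
-- def c_op(array):
--     array_t = [[0]*len(array) for _ in range(len(array[0]))]
--     for i in range(len(array)):
--         for j in range(len(array[0])):
--             array_t[j][i] = array[i][j]
--
--     new_array_t = r_op(array_t)
--     new_array = [[0]*len(new_array_t) for _ in range(len(new_array_t[0]))]
--     for i in range(len(new_array_t)):
--         for j in range(len(new_array_t[0])):
--             new_array[j][i] = new_array_t[i][j]
--
--     return new_array
-- ===== SOURCE B (Python) =====
-- def _compress(col):
--     # sort the nonzero entries, run-length encode the sorted list, then
--     # stable-sort the (num, cnt) runs by cnt alone: ties keep the runs'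
--     # ascending-num order, which is exactly the (cnt, num) order.
--     vals = sorted(v for v in col if v != 0)
--     runs = []
--     for v in vals:
--         if runs and runs[-1][0] == v:
--             runs[-1] = (v, runs[-1][1] + 1)
--         else:
--             runs.append((v, 1))
--     runs.sort(key=lambda p: p[1])
--     flat = []
--     for num, cnt in runs:
--         flat.append(num)
--         flat.append(cnt)
--     return flat[:101]
--
--
-- def c_op(array):
--     cols = []
--     height = 0
--     for j in range(len(array[0])):
--         c = _compress([row[j] for row in array])
--         cols.append(c)
--         height = max(height, len(c))
--     return [[c[r] if r < len(c) else 0 for c in cols] for r in range(height)]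
-- ===== Notes on version B (the rewrite author's own statement) =====
-- stated objective: alternative
-- what changed: B drops A's two explicit transpose matrices and replaces the Counter-based counting entirely: per column it sorts the nonzero entries, run-length encodes the sorted list in one linear scan, stable-sorts the runs by count alone (ties keep the runs' ascending-value order, giving the (cnt, num) order without a tuple key), truncates with a slice instead of A's break-loop, and assembles the output rows directly by index.
import Mathlib
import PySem

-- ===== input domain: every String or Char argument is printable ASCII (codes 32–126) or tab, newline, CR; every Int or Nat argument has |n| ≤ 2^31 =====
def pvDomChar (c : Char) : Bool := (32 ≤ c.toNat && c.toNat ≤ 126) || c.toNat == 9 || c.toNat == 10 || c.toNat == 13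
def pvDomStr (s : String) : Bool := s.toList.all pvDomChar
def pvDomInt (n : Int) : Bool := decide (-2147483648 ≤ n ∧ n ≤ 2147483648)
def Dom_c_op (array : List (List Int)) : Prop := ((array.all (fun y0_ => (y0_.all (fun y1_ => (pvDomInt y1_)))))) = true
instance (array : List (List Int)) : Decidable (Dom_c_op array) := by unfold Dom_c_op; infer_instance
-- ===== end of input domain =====

-- B counts each column by SORTING its nonzero entries and run-length encoding the
-- sorted list in one linear scan (no Counter/hashing), then stable-sorts the runs by
-- count alone (ties keep the runs' ascending-value order, which is the (cnt, num)
-- order), truncates with a slice instead of A's break-loop, and assembles the output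
-- directly without A's two transpose matrices. Objective: alternative.
-- Equivalence is on the return value only (neither program mutates its argument).

-- ===== PORT A =====
-- xs[i] on lists; exact wherever the Python index is in range (guaranteed by Pre_ /
-- the surrounding range loops); out-of-range would be an IndexError, excluded by Pre_.
def pyGetL (xs : List (List Int)) (i : Int) : List Int := PySem.List.pyGetD xs i []
def pyGetI (xs : List Int) (i : Int) : Int := PySem.List.pyGetD xs i 0
-- xs[i] = v; exact for 0 ≤ i < len(xs), which holds at every use (i from range(len)).
def pySet {α : Type} (xs : List α) (i : Int) (v : α) : List α := xs.set i.toNat v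

-- the transpose double loop that c_op writes out twice inline (identical code both times):
-- t = [[0]*n for _ in range(m)]; for i in range(n): for j in range(m): t[j][i] = a[i][j]
def pyTransp (a : List (List Int)) (n m : Nat) : List (List Int) :=
  (PySem.List.pyRange 0 (n : Int)).foldl (fun t i =>
    (PySem.List.pyRange 0 (m : Int)).foldl (fun t j =>
      pySet t j (pySet (pyGetL t j) i (pyGetI (pyGetL a i) j))) t)
    (List.replicate m (List.replicate n 0))

-- the 'for num, cnt in …: append/break' loop of r_op, with its early exits
def buildRow : List (Int × Int) → List Int → List Int
  | [], acc => acc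
  | (num, cnt) :: rest, acc =>
    let acc1 := acc ++ [num]
    if acc1.length > 100 then acc1
    else
      let acc2 := acc1 ++ [cnt]
      if acc2.length > 100 then acc2
      else buildRow rest acc2

-- one iteration of r_op's first loop body: filter zeros, Counter().most_common()
-- (CPython: sorted(items, key=itemgetter(1), reverse=True)), re-sort by (cnt, num), interleave
def compressA (row : List Int) : List Int :=
  buildRow (PySem.List.sorted2
              (PySem.List.sorted (PySem.Dict.counter (row.filter (fun x => x != 0))).items
                (fun p => p.2) true)
              (fun p => p.2) (fun p => p.1)) []

-- r_op; max_len is a Python int but only ever holds list lengths, kept as Nat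
def r_op (a : List (List Int)) : List (List Int) :=
  let st := a.foldl (fun (s : List (List Int) × Nat) row =>
    (s.1 ++ [compressA row], max s.2 (compressA row).length)) ([], 0)
  st.1.map (fun row => row ++ List.replicate (st.2 - row.length) 0)

def c_op (array : List (List Int)) : List (List Int) :=
  let array_t := pyTransp array array.length (pyGetL array 0).length
  let new_array_t := r_op array_t
  pyTransp new_array_t new_array_t.length (pyGetL new_array_t 0).length

-- ===== PORT B =====
-- the RLE loop body: 'if runs and runs[-1][0] == v: runs[-1] = (v, runs[-1][1] + 1)
-- else: runs.append((v, 1))' (runs[-1] read/write via the PySem primitives)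
def rleStep (runs : List (Int × Int)) (v : Int) : List (Int × Int) :=
  if runs ≠ [] ∧ (PySem.List.pyGetD runs (-1) (0, 0)).1 = v then
    PySem.List.pySetD runs (-1) (v, (PySem.List.pyGetD runs (-1) (0, 0)).2 + 1)
  else runs ++ [(v, 1)]

-- _compress: sort the nonzero entries, RLE-scan, stable sort by cnt, interleave, flat[:101]
def compressB (col : List Int) : List Int :=
  let vals := PySem.List.sorted (col.filter (fun v => v != 0)) (fun x => x) false
  let runs := vals.foldl rleStep []
  let runs2 := PySem.List.sorted runs (fun p => p.2) false
  PySem.List.slice (runs2.foldl (fun acc p => acc ++ [p.1, p.2]) []) none (some 101)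

def c_op_alt (array : List (List Int)) : List (List Int) :=
  let st := (PySem.List.pyRange 0 ((pyGetL array 0).length : Int)).foldl
    (fun (s : List (List Int) × Int) j =>
      (s.1 ++ [compressB (array.map (fun row => pyGetI row j))],
       max s.2 ((compressB (array.map (fun row => pyGetI row j))).length : Int))) ([], 0)
  (PySem.List.pyRange 0 st.2).map (fun r =>
    st.1.map (fun c => if r < (c.length : Int) then pyGetI c r else 0))

-- ===== PRECONDITION & SPEC =====
-- Exactly where the Python A returns: a nonempty array with a nonempty first row
-- (array[0] / new_array_t[0] would raise IndexError otherwise) and every row at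
-- least as long as the first (A reads row[j] for j < len(array[0]): shorter rows
-- raise IndexError; extra entries of longer rows are ignored by both programs).
def Pre_c_op (array : List (List Int)) : Prop :=
  array ≠ [] ∧ 0 < array.headI.length ∧ ∀ row ∈ array, array.headI.length ≤ row.length
instance (array : List (List Int)) : Decidable (Pre_c_op array) := by unfold Pre_c_op; infer_instance
def pvWitness_c_op : List (List Int) := [[1, 2], [0, 1], [1, 1]]

def Spec_c_op (array : List (List Int)) (out : List (List Int)) : Prop := out = c_op_alt array
instance (array : List (List Int)) (out : List (List Int)) : Decidable (Spec_c_op array out) := by unfold Spec_c_op; infer_instance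

-- ===== CLAIM (what is proved, stated in full; the proofs are below) =====
def Claim_equal_c_op : Prop := ∀ (array : List (List Int)), Dom_c_op array → Pre_c_op array → Spec_c_op array (c_op array)

-- ===== LEMMAS AND PROOFS =====

-- entry (i, j) read by the transpose loops
def tval (a : List (List Int)) (i j : Nat) : Int := pyGetI (pyGetL a (i : Int)) (j : Int)

-- setting one position of a range-map is a range-map with the function patched
lemma set_map_range {α : Type} (m k : Nat) (g : Nat → α) (v : α) :
    ((List.range m).map g).set k v = (List.range m).map (fun j => if j = k then v else g j) := by
  apply List.ext_getElem
  · simp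
  · intro i h1 h2
    simp only [List.getElem_set, List.getElem_map, List.getElem_range]
    by_cases h : k = i <;> simp [h, eq_comm]

-- the inner 'for j in range(m)' loop: each slot j < k is rewritten once, in place
lemma inner_fold (m : Nat) (g : Nat → List Int) (F : Nat → List Int → List Int) :
    ∀ k ≤ m,
    (List.range k).foldl (fun t (j : Nat) => pySet t (j : Int) (F j (pyGetL t (j : Int))))
        ((List.range m).map g)
      = (List.range m).map (fun j => if j < k then F j (g j) else g j) := by
  intro k
  induction k with
  | zero => intro _; simp
  | succ k ih =>
    intro hk
    rw [List.range_succ, List.foldl_append, ih (by omega)]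
    simp only [List.foldl_cons, List.foldl_nil]
    have hget : pyGetL ((List.range m).map (fun j => if j < k then F j (g j) else g j)) (k : Int)
        = g k := by
      unfold pyGetL
      rw [PySem.List.pyGetD_natCast, PySem.List.getD_map_range _ _ _ _ (by omega)]
      simp
    rw [hget]
    unfold pySet
    rw [Int.toNat_natCast, set_map_range m k _ _]
    apply List.map_congr_left
    intro j _
    by_cases h1 : j = k
    · simp [h1]
    · by_cases h2 : j < k <;> simp [h1, h2] <;> omega

-- the transpose double loop computes the (m × n) matrix of entries a[i][j]
lemma pyTransp_eq (a : List (List Int)) (n m : Nat) :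
    pyTransp a n m
      = (List.range m).map (fun j => (List.range n).map (fun i => tval a i j)) := by
  unfold pyTransp
  simp only [PySem.List.pyRange_zero_natCast, List.foldl_map]
  have main : ∀ k ≤ n, (List.range k).foldl
      (fun t (i : Nat) => (List.range m).foldl (fun t (j : Nat) =>
         pySet t (j : Int) (pySet (pyGetL t (j : Int)) (i : Int) (pyGetI (pyGetL a (i : Int)) (j : Int)))) t)
      (List.replicate m (List.replicate n 0))
    = (List.range m).map (fun j => (List.range n).map (fun i => if i < k then tval a i j else 0)) := by
    intro k
    induction k with
    | zero =>
      intro _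
      simp [List.map_const']
    | succ k ih =>
      intro hk
      rw [List.range_succ, List.foldl_append, ih (by omega)]
      simp only [List.foldl_cons, List.foldl_nil]
      rw [inner_fold m _ (fun j row => pySet row (k : Int) (pyGetI (pyGetL a (k : Int)) (j : Int))) m le_rfl]
      apply List.map_congr_left
      intro j hj
      simp only [List.mem_range] at hj
      rw [if_pos hj]
      unfold pySet
      rw [Int.toNat_natCast, set_map_range n k _ _]
      apply List.map_congr_left
      intro i _
      by_cases h1 : i = k
      · subst h1; simp [tval]
      · by_cases h2 : i < k <;> simp [h1, h2] <;> omega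
  rw [main n le_rfl]
  apply List.map_congr_left
  intro j _
  apply List.map_congr_left
  intro i hi
  simp only [List.mem_range] at hi
  rw [if_pos hi]

-- Python tuple sort by (k1, k2) is the sort keyed by the lexicographic product
lemma sorted2_eq_sorted_lex {α : Type} (xs : List α) (k1 k2 : α → Int) :
    PySem.List.sorted2 xs k1 k2
      = PySem.List.sorted xs (fun x => toLex (k1 x, k2 x)) := by
  unfold PySem.List.sorted2 PySem.List.sorted
  simp only []
  have hcmp : (fun a b => decide (k1 a < k1 b) || (!decide (k1 b < k1 a) && decide (k2 a < k2 b)))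
      = (fun a b => decide (toLex (k1 a, k2 a) < toLex (k1 b, k2 b))) := by
    funext a b
    rcases lt_trichotomy (k1 a) (k1 b) with h | h | h
    · simp [Prod.Lex.lt_iff, h, not_lt_of_gt h]
    · simp [Prod.Lex.lt_iff, h]
    · simp [Prod.Lex.lt_iff, h, not_lt_of_gt h, ne_of_gt h]
  rw [hcmp]
  simp

-- the break-loop interleaving is the truncated flattening
lemma buildRow_eq : ∀ (pairs : List (Int × Int)) (acc : List Int), acc.length ≤ 100 →
    buildRow pairs acc = acc ++ (pairs.flatMap (fun p => [p.1, p.2])).take (101 - acc.length) := by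
  intro pairs
  induction pairs with
  | nil => intro acc _; simp [buildRow]
  | cons p rest ih =>
    intro acc hacc
    obtain ⟨num, cnt⟩ := p
    simp only [buildRow, List.flatMap_cons]
    by_cases h1 : acc.length = 100
    · rw [if_pos (by simp [h1])]
      have h : 101 - acc.length = 1 := by omega
      simp [h]
    · rw [if_neg (by simp; omega)]
      by_cases h2 : acc.length = 99
      · rw [if_pos (by simp [h2])]
        have h : 101 - acc.length = 2 := by omega
        simp [h]
      · rw [if_neg (by simp; omega)]
        rw [ih _ (by simp; omega)]
        have h3 : 101 - acc.length = (101 - (acc.length + 1 + 1)) + 1 + 1 := by omega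
        simp only [List.length_append, List.length_cons, List.length_nil]
        rw [h3]
        simp [List.take_succ_cons]

-- the lexicographic (cnt, num) order on (num, cnt) pairs
def LexLt (a b : Int × Int) : Prop := toLex (a.2, a.1) < toLex (b.2, b.1)

-- insertBy on a cons, as the obvious equation
lemma insertBy_cons {α : Type} (before : α → α → Bool) (x y : α) (ys : List α) :
    PySem.List.insertBy before x (y :: ys)
      = if before x y then x :: y :: ys else y :: PySem.List.insertBy before x ys := rfl

-- rleStep on a nonempty accumulator, in dropLast/getLast form
lemma rleStep_concat (rs : List (Int × Int)) (a c v : Int) :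
    rleStep (rs ++ [(a, c)]) v
      = if a = v then rs ++ [(v, c + 1)] else rs ++ [(a, c)] ++ [(v, 1)] := by
  unfold rleStep
  rw [PySem.List.pyGetD_neg_one_append_singleton]
  by_cases h : a = v
  · rw [if_pos (by exact ⟨by simp, h⟩), if_pos h]
    simp [PySem.List.pySetD, PySem.List.pySet?, PySem.List.pyIdx?]
  · rw [if_neg (by rintro ⟨-, h'⟩; exact h h'), if_neg h]

-- the RLE fold invariant: strictly increasing nums, exact counts, full coverage
lemma rle_good : ∀ (s : List Int), s.Pairwise (· ≤ ·) →
    ((s.foldl rleStep []).Pairwise (fun a b => a.1 < b.1)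
      ∧ (∀ p ∈ s.foldl rleStep [], p.1 ∈ s ∧ p.2 = (s.count p.1 : Int))
      ∧ (∀ v ∈ s, ∃ c, (v, c) ∈ s.foldl rleStep [])) := by
  intro s
  induction s using List.reverseRecOn with
  | nil => intro _; refine ⟨by simp, by simp, by simp⟩
  | append_singleton t v ih =>
    intro h
    rcases List.pairwise_append.mp h with ⟨ht, -, hle⟩
    have hlev : ∀ x ∈ t, x ≤ v := fun x hx => hle x hx v (List.mem_singleton_self v)
    obtain ⟨h1, h2, h3⟩ := ih ht
    rw [List.foldl_append, List.foldl_cons, List.foldl_nil] at *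
    rcases List.eq_nil_or_concat (t.foldl rleStep []) with hnil | ⟨rs, ⟨a, c⟩, hconc⟩
    · -- empty runs: t must be empty
      have htnil : t = [] := by
        by_contra hne
        obtain ⟨x, hx⟩ := List.exists_mem_of_ne_nil t hne
        obtain ⟨cc, hcc⟩ := h3 x hx
        rw [hnil] at hcc
        exact absurd hcc (List.not_mem_nil)
      subst htnil
      simp only [List.foldl_nil] at *
      refine ⟨by simp [rleStep], ?_, ?_⟩
      · intro p hp
        simp [rleStep] at hp
        subst hp
        simp
      · intro x hx
        simp at hx
        subst hx
        exact ⟨1, by simp [rleStep]⟩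
    · rw [List.concat_eq_append] at hconc
      rw [hconc, rleStep_concat]
      have hrs_lt : ∀ q ∈ rs, q.1 < a := by
        intro q hq
        have := List.pairwise_append.mp (hconc ▸ h1)
        exact this.2.2 q hq (a, c) (List.mem_singleton_self _) 
      have hmem : ∀ p ∈ rs ++ [(a, c)], p.1 ∈ t ∧ p.2 = (t.count p.1 : Int) := hconc ▸ h2
      have hcov : ∀ x ∈ t, ∃ cc, (x, cc) ∈ rs ++ [(a, c)] := hconc ▸ h3
      have hpw : (rs ++ [(a, c)]).Pairwise (fun p q => p.1 < q.1) := hconc ▸ h1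
      have hav : a ≤ v := hlev a (hmem (a, c) (by simp)).1
      by_cases hcase : a = v
      · subst hcase
        rw [if_pos rfl]
        refine ⟨?_, ?_, ?_⟩
        · -- pairwise: same fsts
          rcases List.pairwise_append.mp hpw with ⟨hrs, -, hx⟩
          exact List.pairwise_append.mpr ⟨hrs, by simp, by
            intro p hp q hq; simp at hq; subst hq; exact hx p hp (a, c) (by simp)⟩
        · intro p hp
          rcases List.mem_append.mp hp with hp' | hp'
          · obtain ⟨hm, hc⟩ := hmem p (List.mem_append_left _ hp')
            have hne : p.1 ≠ a := ne_of_lt (hrs_lt p hp')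
            refine ⟨List.mem_append_left _ hm, ?_⟩
            rw [List.count_append, List.count_singleton]
            simp [hc, Ne.symm hne]
          · simp at hp'
            subst hp'
            obtain ⟨hm, hc⟩ := hmem (a, c) (by simp)
            refine ⟨List.mem_append_left _ hm, ?_⟩
            simp only [List.count_append, List.count_singleton]
            simp at hc ⊢
            omega
        · intro x hx
          rcases List.mem_append.mp hx with hx' | hx'
          · obtain ⟨cc, hcc⟩ := hcov x hx'
            rcases List.mem_append.mp hcc with hin | hin
            · exact ⟨cc, List.mem_append_left _ hin⟩
            · simp at hin
              exact ⟨c + 1, by simp [hin.1]⟩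
          · simp at hx'
            subst hx'
            exact ⟨c + 1, by simp⟩
      · rw [if_neg hcase]
        have hvnot : v ∉ t := by
          intro hv
          obtain ⟨cc, hcc⟩ := hcov v hv
          rcases List.mem_append.mp hcc with hin | hin
          · have := hrs_lt _ hin
            simp at this
            have hvle := hlev v hv
            omega
          · simp at hin
            exact hcase hin.1.symm
        refine ⟨?_, ?_, ?_⟩
        · refine List.pairwise_append.mpr ⟨hpw, by simp, ?_⟩
          intro p hp q hq
          simp at hq
          subst hq
          obtain ⟨hm, -⟩ := hmem p hp
          have : p.1 ≤ v := hlev _ hm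
          have : p.1 ≠ v := fun he => hvnot (he ▸ hm)
          omega
        · intro p hp
          rcases List.mem_append.mp hp with hp' | hp'
          · obtain ⟨hm, hc⟩ := hmem p hp'
            have hne : p.1 ≠ v := fun he => hvnot (he ▸ hm)
            refine ⟨List.mem_append_left _ hm, ?_⟩
            rw [List.count_append, List.count_singleton]
            simp [hc, Ne.symm hne]
          · simp at hp'
            subst hp'
            refine ⟨by simp, ?_⟩
            simp only [List.count_append, List.count_singleton]
            have : t.count v = 0 := List.count_eq_zero.mpr hvnot
            simp [this]
        · intro x hx
          rcases List.mem_append.mp hx with hx' | hx'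
          · obtain ⟨cc, hcc⟩ := hcov x hx'
            exact ⟨cc, List.mem_append_left _ hcc⟩
          · simp at hx'
            subst hx'
            exact ⟨1, by simp⟩


-- stability of the insertion sort by cnt: inserting a pair whose num exceeds every num
-- in a LexLt-sorted accumulator keeps it LexLt-sorted
lemma insertBy_lexlt (x : Int × Int) : ∀ (acc : List (Int × Int)),
    acc.Pairwise LexLt → (∀ a ∈ acc, a.1 < x.1) →
    (PySem.List.insertBy (fun a b => decide (a.2 < b.2)) x acc).Pairwise LexLt := by
  intro acc
  induction acc with
  | nil => intro _ _; simp [PySem.List.insertBy]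
  | cons y ys ih =>
    intro hp hn
    rw [insertBy_cons]
    rcases List.pairwise_cons.mp hp with ⟨hy, hys⟩
    by_cases hb : x.2 < y.2
    · rw [if_pos (by simpa)]
      have hxy : LexLt x y := Prod.Lex.lt_iff.mpr (Or.inl hb)
      exact List.pairwise_cons.mpr ⟨by
        intro z hz
        rcases List.mem_cons.mp hz with rfl | hz'
        · exact hxy
        · exact lt_trans hxy (hy z hz'), hp⟩
    · rw [if_neg (by simpa using hb)]
      refine List.pairwise_cons.mpr ⟨?_, ih hys (fun a ha => hn a (List.mem_cons_of_mem _ ha))⟩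
      intro z hz
      rcases (PySem.List.mem_insertBy _ _ _ _).mp hz with rfl | hz'
      · exact Prod.Lex.lt_iff.mpr (by
          have h1 := hn y List.mem_cons_self
          rcases lt_or_eq_of_le (not_lt.mp hb) with h | h
          · exact Or.inl h
          · exact Or.inr ⟨h, h1⟩)
      · exact hy z hz' 

lemma foldl_insertBy_lexlt : ∀ (l acc : List (Int × Int)),
    acc.Pairwise LexLt → (∀ a ∈ acc, ∀ b ∈ l, a.1 < b.1) →
    l.Pairwise (fun a b => a.1 < b.1) →
    (l.foldl (fun acc x => PySem.List.insertBy (fun a b => decide (a.2 < b.2)) x acc) acc).Pairwise LexLt := by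
  intro l
  induction l with
  | nil => intro acc hp _ _; exact hp
  | cons x t ih =>
    intro acc hp hn hl
    rcases List.pairwise_cons.mp hl with ⟨hx, ht⟩
    rw [List.foldl_cons]
    apply ih
    · exact insertBy_lexlt x acc hp (fun a ha => hn a ha x List.mem_cons_self)
    · intro a ha b hb
      rcases (PySem.List.mem_insertBy _ _ _ _).mp ha with rfl | ha'
      · exact hx b hb
      · exact hn a ha' b (List.mem_cons_of_mem _ hb)
    · exact ht

-- the compression cores agree on every column
lemma compressA_eq_compressB (col : List Int) : compressA col = compressB col := by
  unfold compressA compressB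
  dsimp only
  set vals := col.filter (fun x => x != 0) with hvals
  set s := PySem.List.sorted vals (fun x => x) false with hs
  set runs := s.foldl rleStep [] with hruns
  set runs2 := PySem.List.sorted runs (fun p => p.2) false with hruns2
  have hs_perm : s.Perm vals := PySem.List.sorted_perm vals (fun x => x) false
  have hs_pw : s.Pairwise (· ≤ ·) := by
    have := PySem.List.sorted_pairwise vals (fun x : Int => x)
    simpa using this
  obtain ⟨hg1, hg2, hg3⟩ := rle_good s hs_pw
  -- runs is a permutation of Counter(vals).items
  have hitems : (PySem.Dict.counter vals).items
      = (PySem.Set.ofList vals).map (fun k => (k, (vals.count k : Int))) :=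
    PySem.Dict.items_counter vals
  have hnodup_runs : runs.Nodup := by
    exact hg1.imp (fun {a b} h => by intro he; rw [he] at h; exact lt_irrefl _ h)
  have hnodup_items : ((PySem.Set.ofList vals).map (fun k => (k, (vals.count k : Int)))).Nodup := by
    apply List.Nodup.map
    · intro a b hab
      exact (Prod.mk.injEq _ _ _ _ ▸ hab : a = b ∧ _).1
    · exact PySem.Set.nodup_ofList vals
  have hperm_runs_items : runs.Perm ((PySem.Set.ofList vals).map (fun k => (k, (vals.count k : Int)))) := by
    rw [List.perm_ext_iff_of_nodup hnodup_runs hnodup_items]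
    intro p
    constructor
    · intro hp
      obtain ⟨hm, hc⟩ := hg2 p hp
      have hm' : p.1 ∈ vals := hs_perm.mem_iff.mp hm
      have hcnt : s.count p.1 = vals.count p.1 := hs_perm.count_eq p.1
      have : p = (p.1, (vals.count p.1 : Int)) := by
        rw [Prod.ext_iff]; exact ⟨rfl, by rw [hc, hcnt]⟩
      rw [this]
      exact List.mem_map.mpr ⟨p.1, (PySem.Set.mem_ofList _ _).mpr hm', rfl⟩
    · intro hp
      obtain ⟨k, hk, rfl⟩ := List.mem_map.mp hp
      have hk' : k ∈ vals := (PySem.Set.mem_ofList _ _).mp hk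
      have hk'' : k ∈ s := hs_perm.mem_iff.mpr hk'
      obtain ⟨c, hc⟩ := hg3 k hk''
      have := (hg2 (k, c) hc).2
      simp only at this
      rw [hs_perm.count_eq k] at this
      rw [show ((vals.count k : Int)) = c from this.symm] at *
      exact hc
  -- B's stable sort by cnt is sorted in the lexicographic (cnt, num) order
  have hB_pw : runs2.Pairwise LexLt := by
    rw [hruns2, PySem.List.sorted_eq_foldl_insertBy]
    exact foldl_insertBy_lexlt runs [] (by simp) (by simp) hg1
  have hB_perm : runs2.Perm runs := PySem.List.sorted_perm runs (fun p => p.2) false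
  -- A's doubly-sorted list
  rw [sorted2_eq_sorted_lex]
  set LA := PySem.List.sorted
      (PySem.List.sorted (PySem.Dict.counter vals).items (fun p => p.2) true)
      (fun p => toLex (p.2, p.1)) false with hLA
  have hA_pw : LA.Pairwise (fun a b => toLex (a.2, a.1) ≤ toLex (b.2, b.1)) :=
    PySem.List.sorted_pairwise _ (fun p : Int × Int => toLex (p.2, p.1))
  have hA_perm : LA.Perm (PySem.Dict.counter vals).items :=
    (PySem.List.sorted_perm _ _ _).trans (PySem.List.sorted_perm _ _ _)
  have key_inj : Function.Injective (fun (p : Int × Int) => toLex (p.2, p.1)) := by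
    intro p q h
    have h' : (p.2, p.1) = (q.2, q.1) := toLex.injective h
    simp only [Prod.mk.injEq] at h'
    exact Prod.ext h'.2 h'.1
  have hAB : LA = runs2 := by
    apply PySem.List.eq_of_perm_of_pairwise_le_of_injective (fun p => toLex (p.2, p.1)) key_inj
    · refine hA_perm.trans ?_
      rw [hitems]
      exact (hB_perm.trans hperm_runs_items).symm
    · exact hA_pw
    · exact hB_pw.imp le_of_lt
  rw [hAB, buildRow_eq _ [] (by simp),
    PySem.List.foldl_append_eq_flatMap, PySem.List.slice_to _ (by norm_num)]
  simp

-- a map over range(len l) of reads of l is a map over l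
lemma map_range_getD {α β : Type} (l : List α) (f : α → β) (d : α) :
    (List.range l.length).map (fun i => f (l.getD i d)) = l.map f := by
  apply List.ext_getElem
  · simp
  · intro i h1 h2
    simp only [List.length_map, List.length_range] at h1
    simp only [List.getElem_map, List.getElem_range, List.getD_eq_getElem?_getD,
      List.getElem?_eq_getElem h1, Option.getD_some]

-- column j of the input, as both programs read it
def colOf (array : List (List Int)) (j : Nat) : List Int :=
  array.map (fun row => pyGetI row (j : Int))

lemma transp1 (array : List (List Int)) (m : Nat) :
    pyTransp array array.length m = (List.range m).map (colOf array) := by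
  rw [pyTransp_eq]
  apply List.map_congr_left
  intro j _
  have hstep : ∀ i, tval array i j = pyGetI (array.getD i []) (j : Int) := by
    intro i; unfold tval pyGetL; rw [PySem.List.pyGetD_natCast]
  simp only [hstep]
  exact map_range_getD array (fun row => pyGetI row (j : Int)) []

lemma r_op_char (a : List (List Int)) :
    r_op a = a.map (fun row => compressA row ++
      List.replicate ((a.foldl (fun acc row => max acc (compressA row).length) 0)
        - (compressA row).length) 0) := by
  unfold r_op
  rw [PySem.List.foldl_prod_mk (f := fun acc row => acc ++ [compressA row])
      (g := fun acc row => max acc (compressA row).length)]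
  dsimp only
  rw [PySem.List.foldl_append_singleton_eq_map, List.nil_append, List.map_map]
  rfl

lemma transp2 (g : Nat → List Int) (m ml : Nat) (hm : 0 < m)
    (hlen : ∀ j < m, (g j).length = ml) :
    pyTransp ((List.range m).map g) ((List.range m).map g).length
        (pyGetL ((List.range m).map g) 0).length
      = (List.range ml).map (fun r => (List.range m).map (fun j => (g j).getD r 0)) := by
  have hget0 : pyGetL ((List.range m).map g) 0 = g 0 := by
    unfold pyGetL
    rw [show (0 : Int) = ((0 : Nat) : Int) by rfl, PySem.List.pyGetD_natCast,
      PySem.List.getD_map_range _ _ _ _ hm]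
  rw [List.length_map, List.length_range, hget0, hlen 0 hm, pyTransp_eq]
  apply List.map_congr_left
  intro r _
  apply List.map_congr_left
  intro j hj
  simp only [List.mem_range] at hj
  unfold tval pyGetL pyGetI
  simp only [PySem.List.pyGetD_natCast]
  rw [PySem.List.getD_map_range _ _ _ _ hj]

-- the Int-valued max-length fold of B computes the same Nat fold as A, cast
lemma foldl_max_int_nat {α : Type} (l : List α) (f : α → Nat) : ∀ a : Nat,
    l.foldl (fun (x : Int) y => max x (f y : Int)) (a : Int)
      = ((l.foldl (fun x y => max x (f y)) a : Nat) : Int) := by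
  induction l with
  | nil => intro a; rfl
  | cons x t ih =>
    intro a
    rw [List.foldl_cons, List.foldl_cons, ← Nat.cast_max, ih]

-- the same fold starting at the literal 0
lemma foldl_max_int_nat0 {α : Type} (l : List α) (f : α → Nat) :
    l.foldl (fun (x : Int) y => max x (f y : Int)) 0
      = ((l.foldl (fun x y => max x (f y)) 0 : Nat) : Int) := by
  simpa using foldl_max_int_nat l f 0

theorem c_op_spec_aux (array : List (List Int)) (h : Pre_c_op array) :
    c_op array = c_op_alt array := by
  obtain ⟨hne, hm0, hrows⟩ := h
  have hhead : pyGetL array 0 = array.headI := by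
    cases array with
    | nil => exact absurd rfl hne
    | cons a t =>
      unfold pyGetL
      rw [show (0 : Int) = ((0 : Nat) : Int) from rfl, PySem.List.pyGetD_natCast]
      rfl
  have hm : 0 < (pyGetL array 0).length := by rw [hhead]; exact hm0
  unfold c_op c_op_alt
  dsimp only
  -- A side: transpose, r_op, characterize
  rw [transp1 array, r_op_char, List.map_map, List.foldl_map]
  simp only [compressA_eq_compressB]
  -- B side: split the fold into the column list and the running height
  rw [PySem.List.pyRange_zero_natCast, List.foldl_map,
    PySem.List.foldl_prod_mk
      (f := fun acc (j : Nat) => acc ++ [compressB (array.map (fun row => pyGetI row (j : Int)))])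
      (g := fun acc (j : Nat) => max acc ((compressB (array.map (fun row => pyGetI row (j : Int)))).length : Int))]
  dsimp only
  rw [PySem.List.foldl_append_singleton_eq_map, List.nil_append, foldl_max_int_nat0,
    PySem.List.pyRange_zero_natCast, List.map_map]
  rw [show (fun (j : Nat) => compressB (array.map (fun row => pyGetI row (j : Int))))
        = (fun j => compressB (colOf array j)) from rfl]
  rw [show (fun (x : Nat) (j : Nat) => max x (compressB (array.map (fun row => pyGetI row (j : Int)))).length)
        = (fun x j => max x (compressB (colOf array j)).length) from rfl]
  set ML := List.foldl (fun x j => max x (compressB (colOf array j)).length) 0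
      (List.range (pyGetL array 0).length) with hML
  -- transpose of A's padded matrix
  rw [transp2 ((fun row => compressB row ++ List.replicate (ML - (compressB row).length) 0)
        ∘ colOf array) _ ML hm (by
    intro j hj
    have hle := (PySem.List.le_foldl_max_nat (List.range (pyGetL array 0).length)
      (fun y => (compressB (colOf array y)).length) 0).2 j (List.mem_range.mpr hj)
    simp only [Function.comp_apply, List.length_append, List.length_replicate]
    omega)]
  apply List.map_congr_left
  intro r hr
  simp only [List.mem_range] at hr
  simp only [Function.comp_apply]
  rw [List.map_map]
  apply List.map_congr_left
  intro j hj
  simp only [List.mem_range] at hj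
  set cB := compressB (colOf array j) with hcB
  simp only [Function.comp_apply]
  show (cB ++ List.replicate (ML - cB.length) 0).getD r 0 = _
  unfold pyGetI
  rw [PySem.List.pyGetD_natCast]
  by_cases hcase : r < cB.length
  · rw [if_pos (by exact_mod_cast hcase), List.getD_append _ _ _ _ hcase]
  · rw [if_neg (by exact_mod_cast hcase), List.getD_append_right _ _ _ _ (by omega)]
    by_cases hin : r - cB.length < ML - cB.length
    · exact List.getD_replicate _ hin
    · exact List.getD_eq_default _ _ (by simp; omega)

-- ===== VERDICT (by name: the statement is the Claim_ definition above) =====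
theorem c_op_spec : Claim_equal_c_op := by
  intro array _ h
  unfold Spec_c_op
  exact c_op_spec_aux array h
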